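-- pv_equiv track=rewrite | github.com/markusrobertjonsson/diffusionmodel | make_plots.py | get_time_labels
-- ===== SOURCE A (Python) =====
-- def get_time_labels(yticks, timenum, time):
--     yticks_new = []
--     for ytick in yticks:
--         if ytick in timenum:
--             ind = timenum.index(ytick)
--             ytick_new = time[ind]
--             if ytick_new.endswith('M12'):
--                 ytick_new = ytick_new[:-3]
--                 ytick_new = str(int(ytick_new) + 1)
--         else:
--             ytick_new = ""
--         yticks_new.append(ytick_new)
--     return yticks_new
-- ===== SOURCE B (Python) =====
-- def get_time_labels(yticks, timenum, time):
--     # Inverted "scatter" pass: index the positions of each requested tick once,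
--     # then walk the (timenum, time) pairs a single time and write results in place.
--     res = [""] * len(yticks)
--     want = {}
--     for pos, ytick in enumerate(yticks):
--         want.setdefault(ytick, []).append(pos)
--     for tn, label in zip(timenum, time):
--         positions = want.pop(tn, ())
--         for pos in positions:
--             if label.endswith('M12'):
--                 res[pos] = str(int(label[:-3]) + 1)
--             else:
--                 res[pos] = label
--     return res
-- ===== Notes on version B (the rewrite author's own statement) =====
-- stated objective: faster
-- what changed: Inverts the traversal: instead of scanning timenum per ytick, B pre-indexes each tick's positions, preallocates the output, and makes one scatter pass over zip(timenum, time), popping each key so the first occurrence wins.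
import Mathlib
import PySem

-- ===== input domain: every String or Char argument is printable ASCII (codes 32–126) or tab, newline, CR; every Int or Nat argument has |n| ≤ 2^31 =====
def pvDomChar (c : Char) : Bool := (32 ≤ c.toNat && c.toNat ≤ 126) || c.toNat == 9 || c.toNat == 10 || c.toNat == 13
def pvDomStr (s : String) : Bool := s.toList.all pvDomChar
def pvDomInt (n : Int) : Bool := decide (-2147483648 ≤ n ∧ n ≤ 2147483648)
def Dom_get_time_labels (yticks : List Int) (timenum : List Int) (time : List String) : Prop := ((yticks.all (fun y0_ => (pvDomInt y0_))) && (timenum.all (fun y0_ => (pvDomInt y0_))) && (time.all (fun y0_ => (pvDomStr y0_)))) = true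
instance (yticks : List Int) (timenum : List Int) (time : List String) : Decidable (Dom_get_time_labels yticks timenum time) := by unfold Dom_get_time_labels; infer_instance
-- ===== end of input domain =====

-- B inverts A's traversal (objective: faster, measured): it pre-indexes the positions of each
-- requested tick, preallocates the output, and fills it in ONE scatter pass over zip(timenum, time),
-- popping each key so the first occurrence wins — instead of A's per-ytick 'in'+'.index' scans.

-- ===== PORT A =====
def get_time_labels (yticks : List Int) (timenum : List Int) (time : List String) : List String :=
  yticks.foldl (fun yticks_new ytick =>
    let ytick_new :=
      if ytick ∈ timenum then
        let ind : Nat := (PySem.List.index? timenum ytick).getD 0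
        let s := (PySem.List.pyGet? time (ind : Int)).getD ""   -- none = IndexError, outside Pre_
        if PySem.Str.endswith s "M12" then
          PySem.Int.toStr ((PySem.Int.ofStr? (PySem.Str.slice s none (some (-3)))).getD 0 + 1)  -- none = ValueError, outside Pre_
        else s
      else ""
    yticks_new ++ [ytick_new]) []

-- ===== PORT B =====
-- want.setdefault(ytick, []).append(pos) over enumerate(yticks)
def pvWant (yticks : List Int) : PySem.Dict Int (List Int) :=
  (PySem.List.enumerate yticks).foldl (fun w q => w.modify q.2 [] (· ++ [q.1])) PySem.Dict.empty

-- one step per (tn, label) pair: positions = want.pop(tn, ()); for pos in positions: res[pos] = …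
def pvScatter (ps : List (Int × String)) (st : List String × PySem.Dict Int (List Int)) :
    List String × PySem.Dict Int (List Int) :=
  ps.foldl (fun st p =>
    let positions := st.2.getD p.1 []
    (positions.foldl (fun r pos =>
        PySem.List.pySetD r pos
          (if PySem.Str.endswith p.2 "M12" then
            PySem.Int.toStr ((PySem.Int.ofStr? (PySem.Str.slice p.2 none (some (-3)))).getD 0 + 1)  -- none = ValueError, outside Pre_
          else p.2)) st.1,
     st.2.erase p.1)) st

def get_time_labels_alt (yticks : List Int) (timenum : List Int) (time : List String) : List String :=
  let res := List.replicate yticks.length ""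
  let want := pvWant yticks
  (pvScatter (timenum.zip time) (res, want)).1

-- ===== PRECONDITION & SPEC =====
-- Pre_ excludes exactly the inputs where the Python A raises: an IndexError when some ytick's
-- first index in timenum is past the end of time, and a ValueError when the matched label ends
-- with 'M12' but its prefix is not an int.
def Pre_get_time_labels (yticks : List Int) (timenum : List Int) (time : List String) : Prop :=
  ∀ y ∈ yticks, y ∈ timenum →
    (PySem.List.index? timenum y).getD 0 < time.length ∧
    (PySem.Str.endswith (time.getD ((PySem.List.index? timenum y).getD 0) "") "M12" = true →
      (PySem.Int.ofStr? (PySem.Str.slice (time.getD ((PySem.List.index? timenum y).getD 0) "") none (some (-3)))).isSome = true)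
instance (yticks : List Int) (timenum : List Int) (time : List String) : Decidable (Pre_get_time_labels yticks timenum time) := by unfold Pre_get_time_labels; infer_instance

def pvWitness_get_time_labels : List Int × List Int × List String := ([5, 3, 9], [3, 5], ["2000M12", "a"])

def Spec_get_time_labels (yticks : List Int) (timenum : List Int) (time : List String) (out : List String) : Prop := out = get_time_labels_alt yticks timenum time
instance (yticks : List Int) (timenum : List Int) (time : List String) (out : List String) : Decidable (Spec_get_time_labels yticks timenum time out) := by unfold Spec_get_time_labels; infer_instance

-- ===== CLAIM (what is proved, stated in full; the proofs are below) =====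
def Claim_equal_get_time_labels : Prop := ∀ (yticks : List Int) (timenum : List Int) (time : List String), Dom_get_time_labels yticks timenum time → Pre_get_time_labels yticks timenum time → Spec_get_time_labels yticks timenum time (get_time_labels yticks timenum time)

-- ===== LEMMAS AND PROOFS =====

-- the common label transformation (both ports contain it inline)
def pvFmt (s : String) : String :=
  if PySem.Str.endswith s "M12" then
    PySem.Int.toStr ((PySem.Int.ofStr? (PySem.Str.slice s none (some (-3)))).getD 0 + 1)
  else s

-- A's append-loop is a map.
theorem pv_foldl_push_eq_map {α β : Type} (l : List α) (g : α → β) (acc : List β) :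
    l.foldl (fun acc y => acc ++ [g y]) acc = acc ++ l.map g := by
  induction l generalizing acc with
  | nil => simp
  | cons x xs ih => simp [List.foldl, ih]

-- dict.erase, at the level of get? (PySem states no erase/get? lemma)
theorem pv_get?_erase (d : PySem.Dict Int (List Int)) (k k' : Int) :
    (d.erase k).get? k' = if k' = k then none else d.get? k' := by
  cases d with | mk items =>
  simp only [PySem.Dict.erase, PySem.Dict.get?, List.find?_filter]
  split_ifs with h
  · subst h
    rw [List.find?_eq_none.mpr]
    · rfl
    · intro p _; simp
  · have : (fun (a : Int × List Int) => decide ((!(a.1 == k)) = true ∧ (a.1 == k') = true))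
        = fun p => p.1 == k' := by
      funext p; by_cases hp : p.1 = k' <;> simp [hp] <;> omega
    rw [this]

theorem pv_getD_erase (d : PySem.Dict Int (List Int)) (k k' : Int) :
    (d.erase k).getD k' [] = if k' = k then [] else d.getD k' [] := by
  rw [PySem.Dict.getD_eq_get?_getD, pv_get?_erase]
  split_ifs <;> simp [PySem.Dict.getD_eq_get?_getD]

-- membership in the position index built by B's first pass
theorem pv_mem_want (yticks : List Int) (y i : Int) :
    i ∈ (pvWant yticks).getD y [] ↔
      ∃ (k : Nat) (_ : k < yticks.length), i = (k : Int) ∧ yticks[k] = y := by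
  have h1 : pvWant yticks
      = ((PySem.List.enumerate yticks).map Prod.swap).foldl
          (fun w q => w.modify q.1 [] (· ++ [q.2])) PySem.Dict.empty := by
    rw [List.foldl_map]; rfl
  rw [h1, PySem.Dict.getD_foldl_modify_append]
  simp only [PySem.Dict.getD_empty, List.nil_append, List.mem_map, List.mem_filter,
    List.mem_map, PySem.List.mem_enumerate_iff, Prod.swap]
  constructor
  · rintro ⟨q, ⟨⟨p, ⟨k, hk, rfl⟩, rfl⟩, hq⟩, rfl⟩
    exact ⟨k, hk, by simpa using hq.symm ▸ rfl, by simpa using hq⟩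
  · rintro ⟨k, hk, rfl, rfl⟩
    exact ⟨(yticks[k], (k : Int)), ⟨⟨(k, yticks[k]), ⟨k, hk, by simp⟩, rfl⟩, by simp⟩, rfl⟩

-- writing one pair's value at all its positions, observed through getElem?
theorem pv_setAll_getElem? (L : List Int) (res : List String) (v : String)
    (hb : ∀ i ∈ L, 0 ≤ i ∧ i < (res.length : Int)) (j : Nat) :
    (L.foldl (fun r pos => PySem.List.pySetD r pos v) res)[j]? =
      if (j : Int) ∈ L then some v else res[j]? := by
  induction L generalizing res with
  | nil => simp
  | cons i L ih =>
    obtain ⟨hi0, hilt⟩ := hb i (List.mem_cons_self ..)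
    have hset : PySem.List.pySetD res i v = res.set i.toNat v :=
      PySem.List.pySetD_of_nonneg res v hi0
    have hlen : (res.set i.toNat v).length = res.length := by simp
    have hb' : ∀ x ∈ L, 0 ≤ x ∧ x < ((res.set i.toNat v).length : Int) := by
      intro x hx; rw [hlen]; exact hb x (List.mem_cons_of_mem _ hx)
    simp only [List.foldl, hset, ih _ hb']
    by_cases hjL : (j : Int) ∈ L
    · simp [hjL, List.mem_cons]
    · have : ((j : Int) ∈ i :: L) ↔ (j : Int) = i := by simp [List.mem_cons, hjL]
      rw [if_neg hjL, List.getElem?_set]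
      by_cases hji : (j : Int) = i
      · have hti : i.toNat = j := by omega
        have hjlt : j < res.length := by omega
        simp [this, hji, hti, hjlt]
      · have hti : ¬ i.toNat = j := by omega
        simp [this, hji, hti]

theorem pv_setAll_length (L : List Int) (res : List String) (v : String) :
    (L.foldl (fun r pos => PySem.List.pySetD r pos v) res).length = res.length := by
  induction L generalizing res with
  | nil => rfl
  | cons i L ih => simp [List.foldl, ih, PySem.List.length_pySetD]

theorem pv_scatter_getElem? (ps : List (Int × String)) (res : List String)
    (w : PySem.Dict Int (List Int))
    (hb : ∀ y, ∀ i ∈ w.getD y [], 0 ≤ i ∧ i < (res.length : Int))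
    (hdisj : ∀ (i : Int) (y1 y2 : Int), i ∈ w.getD y1 [] → i ∈ w.getD y2 [] → y1 = y2)
    (j : Nat) :
    (pvScatter ps (res, w)).1[j]? =
      match ps.find? (fun p => decide ((j : Int) ∈ w.getD p.1 [])) with
      | some p => some (pvFmt p.2)
      | none => res[j]? := by
  induction ps generalizing res w with
  | nil => simp [pvScatter]
  | cons p ps ih =>
    set L := w.getD p.1 [] with hL
    have hstep : pvScatter (p :: ps) (res, w)
        = pvScatter ps (L.foldl (fun r pos => PySem.List.pySetD r pos (pvFmt p.2)) res, w.erase p.1) := by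
      simp only [pvScatter, List.foldl, pvFmt]
      rw [← hL]
    set res' := L.foldl (fun r pos => PySem.List.pySetD r pos (pvFmt p.2)) res with hres'
    have hlen' : res'.length = res.length := pv_setAll_length _ _ _
    have hb' : ∀ y, ∀ i ∈ (w.erase p.1).getD y [], 0 ≤ i ∧ i < (res'.length : Int) := by
      intro y i hi
      rw [pv_getD_erase] at hi
      rw [hlen']
      by_cases hy : y = p.1
      · simp [hy] at hi
      · exact hb y i (by simpa [hy] using hi)
    have hdisj' : ∀ (i y1 y2 : Int), i ∈ (w.erase p.1).getD y1 [] → i ∈ (w.erase p.1).getD y2 [] → y1 = y2 := by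
      intro i y1 y2 h1 h2
      rw [pv_getD_erase] at h1 h2
      by_cases e1 : y1 = p.1
      · simp [e1] at h1
      · by_cases e2 : y2 = p.1
        · simp [e2] at h2
        · exact hdisj i y1 y2 (by simpa [e1] using h1) (by simpa [e2] using h2)
    rw [hstep, ih _ _ hb' hdisj']
    by_cases hjL : (j : Int) ∈ L
    · -- head matches: later pairs find nothing in the erased dict
      have hfind' : ps.find? (fun q => decide ((j : Int) ∈ (w.erase p.1).getD q.1 [])) = none := by
        rw [List.find?_eq_none]
        intro q _
        simp only [decide_eq_true_eq, pv_getD_erase]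
        by_cases hq : q.1 = p.1
        · simp [hq]
        · rw [if_neg hq]
          intro hjq
          exact hq (hdisj _ _ _ hjq hjL)
      have hfind : List.find? (fun q : Int × String => decide ((j : Int) ∈ w.getD q.1 [])) (p :: ps) = some p := by
        rw [List.find?_cons]
        rw [show decide ((j : Int) ∈ w.getD p.1 []) = true by rw [← hL]; simpa using hjL]
      rw [hfind', hfind]
      have := pv_setAll_getElem? L res (pvFmt p.2) (hb p.1) j
      rw [if_pos hjL] at this
      simpa using this
    · have hfind : List.find? (fun q : Int × String => decide ((j : Int) ∈ w.getD q.1 [])) (p :: ps) = List.find? (fun q : Int × String => decide ((j : Int) ∈ w.getD q.1 [])) ps := by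
        rw [List.find?_cons]
        rw [show decide ((j : Int) ∈ w.getD p.1 []) = false by rw [← hL]; simpa using hjL]
      rw [hfind]
      have hpred : (fun q : Int × String => decide ((j : Int) ∈ (w.erase p.1).getD q.1 []))
          = fun q => decide ((j : Int) ∈ w.getD q.1 []) := by
        funext q
        rw [pv_getD_erase]
        by_cases hq : q.1 = p.1
        · simp only [hq, if_pos rfl]
          rw [← hL]
          simp [hjL]
        · simp [hq]
      rw [hpred]
      have hres'j : res'[j]? = res[j]? := by
        have := pv_setAll_getElem? L res (pvFmt p.2) (hb p.1) j
        rwa [if_neg hjL] at this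
      rw [hres'j]

-- The first matching pair of the zip is 'first index, then index into time'.
theorem pv_find_zip (timenum : List Int) (time : List String) (y : Int) :
    ((timenum.zip time).find? (fun p => p.1 == y)).map (·.2) =
      (PySem.List.index? timenum y).bind (fun i => time[i]?) := by
  induction timenum generalizing time with
  | nil => simp [PySem.List.index?]
  | cons t tn ih =>
    cases time with
    | nil =>
      simp only [List.zip_nil_right, List.find?_nil, Option.map_none]
      cases h : PySem.List.index? (t :: tn) y <;> simp
    | cons s ss =>
      by_cases hty : t = y
      · subst hty
        rw [PySem.List.index?_cons_self]
        simp
      · rw [PySem.List.index?_cons_of_ne _ hty]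
        simp only [List.zip_cons_cons, List.find?]
        have hne : (t == y) = false := by simpa using hty
        rw [hne]
        rw [ih ss]
        cases PySem.List.index? tn y <;> simp

theorem get_time_labels_eq (yticks timenum : List Int) (time : List String)
    (hpre : Pre_get_time_labels yticks timenum time) :
    get_time_labels yticks timenum time = get_time_labels_alt yticks timenum time := by
  unfold get_time_labels get_time_labels_alt
  rw [pv_foldl_push_eq_map, List.nil_append]
  have hbW : ∀ y, ∀ i ∈ (pvWant yticks).getD y [],
      0 ≤ i ∧ i < ((List.replicate yticks.length ("" : String)).length : Int) := by
    intro y i hi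
    rw [pv_mem_want] at hi
    obtain ⟨k, hk, rfl, -⟩ := hi
    simp
    omega
  have hdW : ∀ (i y1 y2 : Int), i ∈ (pvWant yticks).getD y1 [] →
      i ∈ (pvWant yticks).getD y2 [] → y1 = y2 := by
    intro i y1 y2 h1 h2
    rw [pv_mem_want] at h1 h2
    obtain ⟨k1, hk1, rfl, hy1⟩ := h1
    obtain ⟨k2, hk2, he, hy2⟩ := h2
    have : k1 = k2 := by exact_mod_cast he
    subst this
    rw [← hy1, ← hy2]
  apply List.ext_getElem?
  intro j
  rw [pv_scatter_getElem? _ _ _ hbW hdW j]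
  by_cases hj : j < yticks.length
  · have hyj : yticks[j]? = some yticks[j] := List.getElem?_eq_getElem hj
    have hymem : yticks[j] ∈ yticks := List.getElem_mem hj
    have hpredeq : (fun p : Int × String => decide ((j : Int) ∈ (pvWant yticks).getD p.1 []))
        = fun p => p.1 == yticks[j] := by
      funext p
      by_cases hp : p.1 = yticks[j]
      · rw [hp]
        rw [show decide ((j : Int) ∈ (pvWant yticks).getD yticks[j] []) = true from
          decide_eq_true ((pv_mem_want yticks yticks[j] (j : Int)).mpr ⟨j, hj, rfl, rfl⟩)]
        simp
      · have hnot : ¬ ((j : Int) ∈ (pvWant yticks).getD p.1 []) := by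
          rw [pv_mem_want]
          rintro ⟨k, hk, he, hy⟩
          have : k = j := by exact_mod_cast he.symm
          subst this
          exact hp hy.symm
        simp [hnot, hp]
    rw [hpredeq]
    by_cases hm : yticks[j] ∈ timenum
    · obtain ⟨hlt, -⟩ := hpre _ hymem hm
      obtain ⟨i, hi⟩ : ∃ i, PySem.List.index? timenum yticks[j] = some i := by
        rw [← Option.isSome_iff_exists, PySem.List.index?_isSome_iff]; exact hm
      rw [hi] at hlt
      simp only [Option.getD_some] at hlt
      have hts : time[i]? = some time[i] := List.getElem?_eq_getElem hlt
      have hfz := pv_find_zip timenum time yticks[j]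
      rw [hi] at hfz
      simp only [Option.bind_some, hts] at hfz
      obtain ⟨q, hq, hq2⟩ : ∃ q, (timenum.zip time).find? (fun p => p.1 == yticks[j]) = some q ∧ q.2 = time[i] := by
        cases hfq : (timenum.zip time).find? (fun p => p.1 == yticks[j]) with
        | none => rw [hfq] at hfz; simp at hfz
        | some q => rw [hfq] at hfz; exact ⟨q, rfl, by simpa using hfz⟩
      rw [hq, List.getElem?_map, hyj]
      simp only [hq2, Option.map_some]
      simp only [if_pos hm, hi, Option.getD_some, PySem.List.pyGet?_natCast, hts,
        Option.getD_some, pvFmt]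
    · have hnone : PySem.List.index? timenum yticks[j] = none := by
        rw [PySem.List.index?_eq_none_iff]; exact hm
      have hfz := pv_find_zip timenum time yticks[j]
      rw [hnone] at hfz
      simp only [Option.bind_none, Option.map_eq_none_iff] at hfz
      rw [hfz, List.getElem?_map, hyj]
      simp [hm, hj]
  · have hfnone : (timenum.zip time).find?
        (fun p : Int × String => decide ((j : Int) ∈ (pvWant yticks).getD p.1 [])) = none := by
      rw [List.find?_eq_none]
      intro p _
      simp only [decide_eq_true_eq, pv_mem_want]
      rintro ⟨k, hk, he, -⟩
      have : k = j := by exact_mod_cast he.symm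
      omega
    rw [hfnone, List.getElem?_map]
    have h1 : yticks[j]? = none := List.getElem?_eq_none (by omega)
    have h2 : (List.replicate yticks.length ("" : String))[j]? = none :=
      List.getElem?_eq_none (by simpa using Nat.le_of_not_lt hj)
    simp [h1, h2]

-- ===== VERDICT (by name: the statement is the Claim_ definition above) =====
theorem get_time_labels_spec : Claim_equal_get_time_labels := by
  intro yticks timenum time _ hpre
  unfold Spec_get_time_labels
  exact get_time_labels_eq yticks timenum time hpre
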